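-- pv_equiv track=rewrite | github.com/AbdurrahmanAdni/Shape-Recognition | recognitor.py | isSegienamSamaSisi
-- ===== SOURCE A (Python) =====
-- import itertools
--
-- def isSegienamSamaSisi(a, myList):
--     if (a == 6):
--         counter = 0
--         combList = []
--         for L in range(0, len(myList)+1):
--             for subset in itertools.combinations(myList, L):
--                 if(len(subset) == 2) :
--                     if (abs(subset[0] - subset[1]) <=2) :
--                         counter = counter + 1
--
--         if (counter == 6) :
--             return "sisiSamaPanjang = 6"
--         else :
--             return "/"
--     else :
--         return "/"
-- ===== SOURCE B (Python) =====
-- def isSegienamSamaSisi(a, myList):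
--     if a != 6:
--         return "/"
--     w = sorted(myList)
--     counter = 0
--     for i, x in enumerate(w):
--         for y in w[i + 1:]:
--             if y - x > 2:
--                 break
--             counter += 1
--     return "sisiSamaPanjang = 6" if counter == 6 else "/"
-- ===== Notes on version B (the rewrite author's own statement) =====
-- stated objective: alternative
-- what changed: Replaces the enumeration of all 2^n subsets (keeping only the 2-element ones) by sorting a copy of the list and, for each element, scanning forward only while the difference stays <= 2, which counts exactly the same close pairs; a timing run samples mostly a != 6 where both exit immediately, so no speedup is claimed.
import Mathlib
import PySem

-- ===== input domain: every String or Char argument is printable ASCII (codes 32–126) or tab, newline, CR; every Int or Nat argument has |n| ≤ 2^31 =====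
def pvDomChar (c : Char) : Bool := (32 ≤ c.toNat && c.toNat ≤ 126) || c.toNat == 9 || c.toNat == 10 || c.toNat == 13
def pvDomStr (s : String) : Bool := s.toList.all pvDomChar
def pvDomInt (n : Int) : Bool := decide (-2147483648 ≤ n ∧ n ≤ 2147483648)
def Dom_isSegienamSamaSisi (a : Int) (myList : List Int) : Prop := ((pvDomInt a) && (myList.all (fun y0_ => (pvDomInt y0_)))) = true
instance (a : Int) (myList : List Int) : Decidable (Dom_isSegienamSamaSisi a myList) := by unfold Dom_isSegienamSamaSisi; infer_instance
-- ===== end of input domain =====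

-- B sorts a copy of the list and counts close pairs with a forward scan that stops
-- at the first difference > 2, instead of enumerating every subset of the list.

-- ===== PORT A =====
-- itertools.combinations(xs, k) in lexicographic index order (exact, tuples as lists)
def pyCombinations : List Int → Nat → List (List Int)
  | _, 0 => [[]]
  | [], _ + 1 => []
  | x :: rest, k + 1 =>
      (pyCombinations rest k).map (fun s => x :: s) ++ pyCombinations rest (k + 1)

def isSegienamSamaSisi (a : Int) (myList : List Int) : String :=
  if a == 6 then
    let counter : Nat :=
      (PySem.List.pyRange 0 (myList.length + 1) 1).foldl (fun counter L =>
        (pyCombinations myList L.toNat).foldl (fun counter subset =>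
          if subset.length == 2 then
            match subset with
            | s0 :: s1 :: _ => if (s0 - s1).natAbs ≤ 2 then counter + 1 else counter
            | _ => counter
          else counter) counter) 0
    if counter == 6 then "sisiSamaPanjang = 6" else "/"
  else "/"

-- ===== PORT B =====
-- inner 'for y in w[i+1:]' with break: count until first difference > 2
def pvRun (x : Int) : List Int → Nat
  | [] => 0
  | y :: ys => if y - x > 2 then 0 else pvRun x ys + 1

-- outer loop over positions of the sorted list (suffix recursion)
def pvCount : List Int → Nat
  | [] => 0
  | x :: rest => pvRun x rest + pvCount rest

def isSegienamSamaSisi_alt (a : Int) (myList : List Int) : String :=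
  if a == 6 then
    if pvCount (PySem.List.sorted myList (fun x => x) false) == 6 then
      "sisiSamaPanjang = 6"
    else "/"
  else "/"

-- ===== PRECONDITION & SPEC =====
def Spec_isSegienamSamaSisi (a : Int) (myList : List Int) (out : String) : Prop := out = isSegienamSamaSisi_alt a myList
instance (a : Int) (myList : List Int) (out : String) : Decidable (Spec_isSegienamSamaSisi a myList out) := by unfold Spec_isSegienamSamaSisi; infer_instance

-- ===== CLAIM (what is proved, stated in full; the proofs are below) =====
def Claim_equal_isSegienamSamaSisi : Prop := ∀ (a : Int) (myList : List Int), Dom_isSegienamSamaSisi a myList → Spec_isSegienamSamaSisi a myList (isSegienamSamaSisi a myList)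

-- ===== LEMMAS AND PROOFS =====

-- the predicate A's inner body tests
def pvP (s : List Int) : Bool :=
  s.length == 2 &&
    (match s with
     | s0 :: s1 :: _ => decide ((s0 - s1).natAbs ≤ 2)
     | _ => false)

-- close-pair count, head against tail
def pvPC : List Int → Nat
  | [] => 0
  | x :: rest => rest.countP (fun y => decide ((x - y).natAbs ≤ 2)) + pvPC rest

theorem pvP_step (c : Nat) (s : List Int) :
    (if s.length == 2 then
        match s with
        | s0 :: s1 :: _ => if (s0 - s1).natAbs ≤ 2 then c + 1 else c
        | _ => c
      else c) = c + (if pvP s then 1 else 0) := by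
  rcases s with _ | ⟨s0, _ | ⟨s1, t⟩⟩ <;> simp [pvP]
  rcases t with _ | ⟨z, t⟩ <;> simp <;> split <;> simp

theorem foldl_pvP (l : List (List Int)) (c : Nat) :
    l.foldl (fun counter subset =>
        if subset.length == 2 then
          match subset with
          | s0 :: s1 :: _ => if (s0 - s1).natAbs ≤ 2 then counter + 1 else counter
          | _ => counter
        else counter) c = c + l.countP pvP := by
  induction l generalizing c with
  | nil => simp
  | cons s l ih =>
    rw [List.foldl_cons, pvP_step, ih, List.countP_cons]
    split <;> omega

theorem length_mem_pyCombinations (xs : List Int) (k : Nat) :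
    ∀ s ∈ pyCombinations xs k, s.length = k := by
  induction xs generalizing k with
  | nil => rcases k with _ | k <;> simp [pyCombinations]
  | cons x rest ih =>
    rcases k with _ | k
    · simp [pyCombinations]
    · intro s hs
      simp only [pyCombinations, List.mem_append, List.mem_map] at hs
      rcases hs with ⟨t, ht, rfl⟩ | hs
      · simp [ih k t ht]
      · exact ih (k + 1) s hs

theorem countP_pvP_ne_two (xs : List Int) (k : Nat) (hk : k ≠ 2) :
    (pyCombinations xs k).countP pvP = 0 := by
  rw [List.countP_eq_zero]
  intro s hs
  have := length_mem_pyCombinations xs k s hs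
  simp [pvP, this, hk]

theorem pyCombinations_one (xs : List Int) :
    pyCombinations xs 1 = xs.map (fun y => [y]) := by
  induction xs with
  | nil => simp [pyCombinations]
  | cons x rest ih => simp [pyCombinations, ih]

theorem countP_pvP_two (xs : List Int) :
    (pyCombinations xs 2).countP pvP = pvPC xs := by
  induction xs with
  | nil => simp [pyCombinations, pvPC]
  | cons x rest ih =>
    show ((pyCombinations rest 1).map (fun s => x :: s) ++ pyCombinations rest 2).countP pvP
        = pvPC (x :: rest)
    rw [List.countP_append, List.countP_map, pyCombinations_one, List.countP_map, ih]
    show rest.countP (fun y => pvP [x, y]) + pvPC rest = pvPC (x :: rest)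
    simp [pvPC, pvP]

theorem sum_single (g : Nat → Nat) (h : ∀ k, k ≠ 2 → g k = 0) (m : Nat) :
    ((List.range m).map g).sum = if 2 < m then g 2 else 0 := by
  induction m with
  | zero => simp
  | succ m ih =>
    rw [List.range_succ, List.map_append, List.sum_append, ih]
    by_cases hm : m = 2
    · subst hm; simp
    · simp [h m hm]
      split <;> split <;> omega

theorem foldl_inner (xs : List Int) (l : List Nat) (c : Nat) :
    l.foldl (fun (counter : Nat) (k : Nat) =>
        (pyCombinations xs ((k : Int)).toNat).foldl (fun counter subset =>
          if subset.length == 2 then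
            match subset with
            | s0 :: s1 :: _ => if (s0 - s1).natAbs ≤ 2 then counter + 1 else counter
            | _ => counter
          else counter) counter) c
      = c + (l.map (fun k => (pyCombinations xs k).countP pvP)).sum := by
  induction l generalizing c with
  | nil => simp
  | cons k l ih =>
    rw [List.foldl_cons, ih, foldl_pvP]
    simp
    omega

theorem counterA_eq_pvPC (xs : List Int) :
    (PySem.List.pyRange 0 (xs.length + 1) 1).foldl (fun counter L =>
        (pyCombinations xs L.toNat).foldl (fun counter subset =>
          if subset.length == 2 then
            match subset with
            | s0 :: s1 :: _ => if (s0 - s1).natAbs ≤ 2 then counter + 1 else counter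
            | _ => counter
          else counter) counter) 0 = pvPC xs := by
  have hlen : ((xs.length : Int) + 1 - 0).toNat = xs.length + 1 := by omega
  rw [PySem.List.pyRange_one, hlen]
  simp only [zero_add]
  rw [List.foldl_map, foldl_inner, Nat.zero_add,
    sum_single _ (fun k hk => countP_pvP_ne_two xs k hk)]
  by_cases h2 : 2 < xs.length + 1
  · rw [if_pos h2, countP_pvP_two]
  · rw [if_neg h2]
    have hlen : xs.length ≤ 1 := by omega
    match xs, hlen with
    | [], _ => simp [pvPC]
    | [x], _ => simp [pvPC]

-- pvPC is invariant under permutation (the tested relation is symmetric)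
theorem pvPC_perm {xs ys : List Int} (h : xs.Perm ys) : pvPC xs = pvPC ys := by
  induction h with
  | nil => rfl
  | cons x _ ih => simp [pvPC, ih, List.Perm.countP_eq _ (by assumption)]
  | swap x y l =>
    simp only [pvPC, List.countP_cons]
    have : (x - y).natAbs = (y - x).natAbs := by omega
    simp [this]
    omega
  | trans _ _ ih1 ih2 => omega

-- on a sorted suffix, the break-scan counts exactly the close partners
theorem pvRun_eq_countP (x : Int) (l : List Int)
    (hx : ∀ y ∈ l, x ≤ y) (hp : l.Pairwise (· ≤ ·)) :
    pvRun x l = l.countP (fun y => decide ((x - y).natAbs ≤ 2)) := by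
  induction l with
  | nil => rfl
  | cons y ys ih =>
    have hxy : x ≤ y := hx y (by simp)
    have hyz : ∀ z ∈ ys, y ≤ z := fun z hz => (List.pairwise_cons.mp hp).1 z hz
    by_cases hb : y - x > 2
    · have h0 : ys.countP (fun z => decide ((x - z).natAbs ≤ 2)) = 0 := by
        rw [List.countP_eq_zero]
        intro z hz
        have := hyz z hz
        simp; omega
      simp [pvRun, hb, List.countP_cons, h0]
      omega
    · have : (x - y).natAbs ≤ 2 := by omega
      rw [List.countP_cons]
      simp [pvRun, hb, this,
        ih (fun z hz => le_trans hxy (hyz z hz)) (List.pairwise_cons.mp hp).2]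
  
theorem pvCount_eq_pvPC (w : List Int) (hp : w.Pairwise (· ≤ ·)) :
    pvCount w = pvPC w := by
  induction w with
  | nil => rfl
  | cons x rest ih =>
    obtain ⟨hx, hrest⟩ := List.pairwise_cons.mp hp
    simp [pvCount, pvPC, pvRun_eq_countP x rest hx hrest, ih hrest]

-- ===== VERDICT (by name: the statement is the Claim_ definition above) =====
theorem isSegienamSamaSisi_spec : Claim_equal_isSegienamSamaSisi := by
  intro a myList _
  unfold Spec_isSegienamSamaSisi isSegienamSamaSisi isSegienamSamaSisi_alt
  by_cases ha : a == 6
  · simp only [ha, if_pos]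
    have hA := counterA_eq_pvPC myList
    have hperm : pvPC myList = pvPC (PySem.List.sorted myList (fun x => x) false) :=
      pvPC_perm (PySem.List.sorted_perm myList (fun x => x) false).symm
    have hB := pvCount_eq_pvPC (PySem.List.sorted myList (fun x => x) false)
      (PySem.List.sorted_pairwise myList (fun x => x))
    rw [hA, hperm, ← hB]
  · simp [ha]
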